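-- pv_equiv track=rewrite | github.com/JeiKeiLim/TIL | coding_test/leetcode/1455_Check_If_a_Word_Occurs_As_a_Prefix.py | isPrefixOfWord2
-- ===== SOURCE A (Python) =====
-- def isPrefixOfWord2(sentence: str, searchWord: str) -> int:
--     search_idx = 0
--     word_idx = 1
--     for char in sentence:
--         if char == " ":
--             word_idx += 1
--             search_idx = 0
--             continue
--
--         if search_idx < 0:
--             continue
--
--         if char == searchWord[search_idx]:
--             search_idx += 1
--         else:
--             search_idx = -1
--
--         if search_idx == len(searchWord):
--             return word_idx
--     return -1
-- ===== SOURCE B (Python) =====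
-- def isPrefixOfWord2(sentence: str, searchWord: str) -> int:
--     for i, word in enumerate(sentence.split(' '), 1):
--         if word.startswith(searchWord):
--             return i
--     return -1
-- ===== Notes on version B (the rewrite author's own statement) =====
-- stated objective: idiomatic
-- what changed: Replaces A's hand-rolled character-level matching state machine (search_idx/word_idx over every char) with the idiomatic split(' ') + enumerate + startswith scan over words.
-- outside the precondition, e.g. on isPrefixOfWord2('  ', ''): A returns -1, B returns 1; on isPrefixOfWord2('', ''): A returns -1, B returns 1
import Mathlib
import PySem

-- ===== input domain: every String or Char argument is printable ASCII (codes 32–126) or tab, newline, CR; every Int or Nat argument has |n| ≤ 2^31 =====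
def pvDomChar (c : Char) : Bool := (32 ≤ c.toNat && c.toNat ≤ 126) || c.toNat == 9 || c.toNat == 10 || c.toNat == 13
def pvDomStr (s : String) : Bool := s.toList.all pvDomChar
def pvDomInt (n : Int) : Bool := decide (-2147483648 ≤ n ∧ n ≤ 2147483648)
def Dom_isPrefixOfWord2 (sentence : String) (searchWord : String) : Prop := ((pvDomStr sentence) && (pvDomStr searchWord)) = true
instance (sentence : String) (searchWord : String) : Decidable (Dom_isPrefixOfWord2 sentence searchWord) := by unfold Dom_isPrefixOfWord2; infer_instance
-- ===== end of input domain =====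

-- B replaces A's char-by-char state machine by the idiomatic split(' ') + startswith scan
-- over words (objective: idiomatic; same O(n) cost).


-- ===== PORT A =====
-- A's for-loop over the characters of `sentence`, carrying (search_idx, word_idx);
-- returning `word_idx` mid-loop becomes the non-recursive branch.
def pvALoop (chars : List Char) (sw : List Char) (si : Int) (wi : Int) : Int :=
  match chars with
  | [] => -1
  | c :: rest =>
    if c = ' ' then pvALoop rest sw 0 (wi + 1)
    else if si < 0 then pvALoop rest sw si wi
    else
      -- `searchWord[search_idx]` (IndexError when sw = [] is excluded by Pre_)
      let si' : Int := if some c = PySem.List.pyGet? sw si then si + 1 else -1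
      if si' = (sw.length : Int) then wi else pvALoop rest sw si' wi

def isPrefixOfWord2 (sentence : String) (searchWord : String) : Int :=
  pvALoop sentence.toList searchWord.toList 0 1

-- ===== PORT B =====
-- Source B: for i, word in enumerate(sentence.split(' '), 1): if word.startswith(searchWord): return i
def pvBLoop (words : List (List Char)) (sw : List Char) (i : Int) : Int :=
  match words with
  | [] => -1
  | w :: ws => if PySem.Chars.startswith w sw then i else pvBLoop ws sw (i + 1)

def isPrefixOfWord2_alt (sentence : String) (searchWord : String) : Int :=
  pvBLoop (PySem.Chars.splitOn sentence.toList [' ']) searchWord.toList 1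

-- ===== PRECONDITION & SPEC =====
-- Pre_ excludes empty searchWord: there A raises IndexError at the first non-space
-- character; A only returns (-1) on an all-space or empty sentence, an artefact of the
-- loop never reaching the indexing, while B naturally returns 1 (every word starts with "").
def Pre_isPrefixOfWord2 (sentence : String) (searchWord : String) : Prop := searchWord ≠ ""
instance (sentence : String) (searchWord : String) : Decidable (Pre_isPrefixOfWord2 sentence searchWord) := by unfold Pre_isPrefixOfWord2; infer_instance

def pvWitness_isPrefixOfWord2 : String × String := ("i love eating burger", "burg")

def Spec_isPrefixOfWord2 (sentence : String) (searchWord : String) (out : Int) : Prop := out = isPrefixOfWord2_alt sentence searchWord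
instance (sentence : String) (searchWord : String) (out : Int) : Decidable (Spec_isPrefixOfWord2 sentence searchWord out) := by unfold Spec_isPrefixOfWord2; infer_instance

-- ===== CLAIM (what is proved, stated in full; the proofs are below) =====
def Claim_equal_isPrefixOfWord2 : Prop := ∀ (sentence : String) (searchWord : String), Dom_isPrefixOfWord2 sentence searchWord → Pre_isPrefixOfWord2 sentence searchWord → Spec_isPrefixOfWord2 sentence searchWord (isPrefixOfWord2 sentence searchWord)


-- ===== LEMMAS AND PROOFS =====

-- `pvConsHead p ws` prepends p to the first word of ws
def pvConsHead (p : List Char) : List (List Char) → List (List Char)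
  | [] => [p]
  | w :: ws => (p ++ w) :: ws

-- Python's s.split(' ') as a structural recursion on the character list
def pvSplit : List Char → List (List Char)
  | [] => [[]]
  | c :: rest => if c = ' ' then [] :: pvSplit rest else pvConsHead [c] (pvSplit rest)

theorem pvSplit_ne_nil (cs : List Char) : pvSplit cs ≠ [] := by
  cases cs with
  | nil => simp [pvSplit]
  | cons c rest =>
    simp only [pvSplit]
    split
    · simp
    · cases h : pvSplit rest <;> simp [pvConsHead]

theorem pvGo_eq (fuel : Nat) : ∀ (cs cur : List Char) (acc : List (List Char)),
    cs.length < fuel →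
    PySem.Chars.splitOn.go [' '] fuel cs cur acc
      = acc.reverse ++ pvConsHead cur.reverse (pvSplit cs) := by
  induction fuel with
  | zero => intro cs cur acc h; omega
  | succ n ih =>
    intro cs cur acc h
    match cs with
    | [] => simp [PySem.Chars.splitOn.go, pvSplit, pvConsHead]
    | c :: rest =>
      by_cases hc : c = ' '
      · subst hc
        have hgo : PySem.Chars.splitOn.go [' '] (n+1) (' ' :: rest) cur acc
            = PySem.Chars.splitOn.go [' '] n rest [] (cur.reverse :: acc) := by
          simp [PySem.Chars.splitOn.go, List.isPrefixOf]
        rw [hgo, ih rest [] (cur.reverse :: acc) (by simp at h ⊢; omega)]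
        simp only [pvSplit]
        cases hx : pvSplit rest with
        | nil => exact absurd hx (pvSplit_ne_nil rest)
        | cons w ws => simp [pvConsHead]
      · have hgo : PySem.Chars.splitOn.go [' '] (n+1) (c :: rest) cur acc
            = PySem.Chars.splitOn.go [' '] n rest (c :: cur) acc := by
          have hbc : (' ' == c) = false := beq_eq_false_iff_ne.mpr (Ne.symm hc)
          simp [PySem.Chars.splitOn.go, List.isPrefixOf, hbc]
        rw [hgo, ih rest (c :: cur) acc (by simp at h ⊢; omega)]
        simp only [pvSplit, if_neg hc]
        cases hx : pvSplit rest with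
        | nil => exact absurd hx (pvSplit_ne_nil rest)
        | cons w ws => simp [pvConsHead]

theorem pvSplitOn_space (cs : List Char) :
    PySem.Chars.splitOn cs [' '] = pvSplit cs := by
  unfold PySem.Chars.splitOn
  rw [pvGo_eq (cs.length + 1) cs [] [] (by omega)]
  cases hx : pvSplit cs with
  | nil => exact absurd hx (pvSplit_ne_nil cs)
  | cons w ws => simp [pvConsHead]

theorem pvSplit_word (w : List Char) (hw : ∀ c ∈ w, c ≠ ' ') :
    ∀ rest, pvSplit (w ++ rest) = pvConsHead w (pvSplit rest) := by
  induction w with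
  | nil =>
    intro rest
    cases hx : pvSplit rest with
    | nil => exact absurd hx (pvSplit_ne_nil rest)
    | cons v vs => simp [pvConsHead, hx]
  | cons c w ih =>
    intro rest
    have hc : c ≠ ' ' := hw c (by simp)
    simp only [List.cons_append, pvSplit, if_neg hc]
    rw [ih (fun x hx => hw x (by simp [hx])) rest]
    cases hx : pvSplit rest with
    | nil => exact absurd hx (pvSplit_ne_nil rest)
    | cons v vs => simp [pvConsHead]

-- what A's loop does after the current word, given the remainder `rest`
def pvAfter (sw rest : List Char) (wi : Int) : Int :=
  match rest with
  | [] => -1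
  | _ :: r => pvALoop r sw 0 (wi + 1)

theorem pvALoop_dead (sw : List Char) : ∀ (w rest : List Char) (wi : Int),
    (∀ c ∈ w, c ≠ ' ') → (rest = [] ∨ rest.head? = some ' ') →
    pvALoop (w ++ rest) sw (-1) wi = pvAfter sw rest wi := by
  intro w
  induction w with
  | nil =>
    intro rest wi _ hrest
    cases rest with
    | nil => simp [pvALoop, pvAfter]
    | cons c r =>
      rcases hrest with h | h
      · exact absurd h (by simp)
      · simp at h
        subst h
        simp [pvALoop, pvAfter]
  | cons c w ih =>
    intro rest wi hw hrest
    have hc : c ≠ ' ' := hw c (by simp)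
    simp only [List.cons_append]
    rw [pvALoop, if_neg hc, if_pos (by decide : (-1 : Int) < 0)]
    exact ih rest wi (fun x hx => hw x (by simp [hx])) hrest

theorem pvALoop_scan (sw : List Char) : ∀ (w : List Char) (si : Nat) (rest : List Char) (wi : Int),
    (∀ c ∈ w, c ≠ ' ') → (rest = [] ∨ rest.head? = some ' ') → si < sw.length →
    pvALoop (w ++ rest) sw (si : Int) wi
      = if (sw.drop si) <+: w then wi else pvAfter sw rest wi := by
  intro w
  induction w with
  | nil =>
    intro si rest wi _ hrest hsi
    have hne : sw.drop si ≠ [] := by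
      intro h
      have := List.drop_eq_nil_iff.mp h
      omega
    rw [if_neg (by intro h; exact hne (List.prefix_nil.mp h))]
    cases rest with
    | nil => simp [pvALoop, pvAfter]
    | cons c r =>
      rcases hrest with h | h
      · exact absurd h (by simp)
      · simp at h
        subst h
        simp [pvALoop, pvAfter]
  | cons c w ih =>
    intro si rest wi hw hrest hsi
    have hc : c ≠ ' ' := hw c (by simp)
    have hw' : ∀ x ∈ w, x ≠ ' ' := fun x hx => hw x (by simp [hx])
    have hdrop : sw.drop si = sw[si] :: sw.drop (si + 1) := List.drop_eq_getElem_cons hsi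
    simp only [List.cons_append]
    rw [pvALoop, if_neg hc, if_neg (by omega)]
    simp only [PySem.List.pyGet?_natCast, List.getElem?_eq_getElem hsi]
    by_cases hm : c = sw[si]
    · have hstep : (if some c = some sw[si] then (si : Int) + 1 else -1) = ((si + 1 : Nat) : Int) := by
        rw [if_pos (by rw [hm])]
        push_cast
        ring
      rw [hstep]
      by_cases hend : si + 1 = sw.length
      · have hdropnil : sw.drop (si + 1) = [] := List.drop_eq_nil_iff.mpr (by omega)
        have hpre : sw.drop si <+: c :: w := by
          rw [hdrop, hdropnil, hm]
          exact ⟨w, rfl⟩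
        rw [if_pos (show ((si + 1 : Nat) : Int) = (sw.length : Int) by exact_mod_cast hend),
          if_pos hpre]
      · rw [if_neg (by intro hx; exact hend (by exact_mod_cast hx))]
        rw [ih (si + 1) rest wi hw' hrest (by omega), hdrop]
        by_cases hp : sw.drop (si + 1) <+: w
        · rw [if_pos hp, if_pos (by rw [List.cons_prefix_cons]; exact ⟨hm.symm, hp⟩)]
        · rw [if_neg hp, if_neg (by rw [List.cons_prefix_cons]; rintro ⟨_, h2⟩; exact hp h2)]
    · have hstep : (if some c = some sw[si] then (si : Int) + 1 else -1) = -1 := by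
        rw [if_neg (by simpa using fun h => hm h)]
      rw [hstep, if_neg (by intro hx; omega)]
      rw [pvALoop_dead sw w rest wi hw' hrest]
      rw [if_neg (by rw [hdrop, List.cons_prefix_cons]; rintro ⟨h1, _⟩; exact hm h1.symm)]

theorem pvDropWhile_head (p : Char → Bool) : ∀ (l : List Char),
    l.dropWhile p = [] ∨ ∃ c r, l.dropWhile p = c :: r ∧ p c = false := by
  intro l
  induction l with
  | nil => exact Or.inl rfl
  | cons c r ih =>
    by_cases hc : p c
    · simpa [List.dropWhile, hc] using ih
    · exact Or.inr ⟨c, r, by simp [List.dropWhile, hc], by simpa using hc⟩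

theorem pvMain (sw : List Char) (hsw : sw ≠ []) : ∀ (n : Nat) (cs : List Char) (wi : Int),
    cs.length ≤ n →
    pvALoop cs sw 0 wi = pvBLoop (pvSplit cs) sw wi := by
  intro n
  induction n with
  | zero =>
    intro cs wi h
    have hnil : cs = [] := List.length_eq_zero_iff.mp (by omega)
    subst hnil
    simp [pvALoop, pvSplit, pvBLoop, PySem.Chars.startswith, List.isPrefixOf_iff_prefix,
      List.prefix_nil, hsw]
  | succ n ih =>
    intro cs wi h
    obtain ⟨w, rest0, hcs, hw, hrest, hlenr⟩ :
        ∃ w rest0, cs = w ++ rest0 ∧ (∀ c ∈ w, c ≠ ' ')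
          ∧ (rest0 = [] ∨ rest0.head? = some ' ') ∧ rest0.length ≤ cs.length := by
      refine ⟨cs.takeWhile (fun c => c ≠ ' '), cs.dropWhile (fun c => c ≠ ' '),
        List.takeWhile_append_dropWhile.symm, ?_, ?_, (List.dropWhile_sublist _).length_le⟩
      · intro c hc
        simpa using List.mem_takeWhile_imp hc
      · rcases pvDropWhile_head (fun c => c ≠ ' ') cs with h0 | ⟨c, r, heq, hpc⟩
        · exact Or.inl h0
        · right
          rw [heq]
          simp at hpc
          simp [hpc]
    subst hcs
    have hsi : 0 < sw.length := List.length_pos_iff.mpr hsw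
    have hscan := pvALoop_scan sw w 0 rest0 wi hw hrest hsi
    simp only [List.drop_zero, Nat.cast_zero] at hscan
    rw [hscan, pvSplit_word w hw rest0]
    cases hr : rest0 with
    | nil =>
      subst hr
      by_cases hp : sw <+: w <;>
        simp [pvConsHead, pvSplit, pvBLoop, pvAfter, PySem.Chars.startswith,
          List.isPrefixOf_iff_prefix, hp]
    | cons c r =>
      subst hr
      have hsp : (c :: r).head? = some ' ' := by
        rcases hrest with h0 | h0
        · exact absurd h0 (by simp)
        · exact h0
      simp at hsp
      subst hsp
      have hlen : r.length ≤ n := by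
        simp at hlenr h
        omega
      have hih := ih r (wi + 1) hlen
      by_cases hp : sw <+: w <;>
        simp [pvConsHead, pvSplit, pvBLoop, pvAfter, PySem.Chars.startswith,
          List.isPrefixOf_iff_prefix, hp, hih]

-- ===== VERDICT =====
theorem isPrefixOfWord2_spec : Claim_equal_isPrefixOfWord2 := by
  intro sentence searchWord _ hpre
  unfold Spec_isPrefixOfWord2 isPrefixOfWord2 isPrefixOfWord2_alt
  rw [pvSplitOn_space]
  have hsw : searchWord.toList ≠ [] := fun hnil => hpre (String.toList_eq_nil_iff.mp hnil)
  exact pvMain searchWord.toList hsw sentence.toList.length sentence.toList 1 (le_refl _)
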